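-- pv_equiv track=rewrite | github.com/micahkberg/Advent-Of-Code-2021 | src/code-23v2.py | make_init_position_dict
-- ===== SOURCE A (Python) =====
-- LETTERS = "ABCD"
--
-- def make_init_position_dict(input_string, edges):
--     """
--     input_string: the string that represents starting conditions
--     edges: hand typed representation of edges
--
--     returns: filled out dictionary of item locations
--     """
--     locations = {i: None for i in edges}
--     row = 1
--     col = 0
--     for char in input_string:
--         locations[LETTERS[col] + str(row)] = char
--         col += 1
--         if col == 4:
--             col = 0
--             row += 1
--     return locations
-- ===== SOURCE B (Python) =====
-- LETTERS = "ABCD"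
--
-- def make_init_position_dict(input_string, edges):
--     locations = {i: None for i in edges}
--     row = 1
--     rest = input_string
--     while rest:
--         chunk, rest = rest[:4], rest[4:]
--         for letter, char in zip(LETTERS, chunk):
--             locations[letter + str(row)] = char
--         row += 1
--     return locations
-- ===== Notes on version B (the rewrite author's own statement) =====
-- stated objective: simpler
-- what changed: Replaces A's per-character loop with mutable row/col counters and a col==4 reset branch by a blocked traversal: slice the string into rows of four and zip each chunk with LETTERS, so the column never appears as a variable.
import Mathlib
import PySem

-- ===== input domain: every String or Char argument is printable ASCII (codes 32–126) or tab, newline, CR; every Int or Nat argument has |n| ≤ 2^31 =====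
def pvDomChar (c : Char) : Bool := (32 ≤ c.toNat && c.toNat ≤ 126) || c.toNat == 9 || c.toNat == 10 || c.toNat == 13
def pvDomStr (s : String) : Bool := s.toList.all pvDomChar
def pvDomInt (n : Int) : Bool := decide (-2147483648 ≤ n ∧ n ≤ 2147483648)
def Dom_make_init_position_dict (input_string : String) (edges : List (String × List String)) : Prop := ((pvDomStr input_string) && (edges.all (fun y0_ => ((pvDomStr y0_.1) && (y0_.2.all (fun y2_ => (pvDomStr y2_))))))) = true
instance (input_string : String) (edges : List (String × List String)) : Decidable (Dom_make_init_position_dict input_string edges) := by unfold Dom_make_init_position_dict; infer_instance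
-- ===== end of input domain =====

-- B replaces A's per-character loop with mutable row/col counters by a blocked
-- traversal: slice the string into rows of 4 and zip each row with LETTERS (simpler).

-- LETTERS = "ABCD"
def pvLETTERS : String := "ABCD"

-- ===== PORT A =====
-- the loop body of A's for-loop, on state (locations, row, col)
-- (col is always 0..3 here, so pyGet? on "ABCD" always returns some; the getD ' '
-- fallback is unreachable)
def pvStepA (st : PySem.Dict String (Option String) × Int × Int) (ch : Char) :
    PySem.Dict String (Option String) × Int × Int :=
  let d := st.1.insert (String.ofList [(PySem.Str.pyGet? pvLETTERS st.2.2).getD ' '] ++ PySem.Int.toStr st.2.1) (some (String.ofList [ch]))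
  let col := st.2.2 + 1
  if col == 4 then (d, st.2.1 + 1, 0) else (d, st.2.1, col)

def make_init_position_dict (input_string : String) (edges : List (String × List String)) : List (String × Option String) :=
  let locations : PySem.Dict String (Option String) :=
    edges.foldl (fun d e => d.insert e.1 none) PySem.Dict.empty
  (input_string.toList.foldl pvStepA (locations, 1, 0)).1.items

-- ===== PORT B =====
-- inner for-loop: for letter, char in zip(LETTERS, chunk): locations[letter+str(row)] = char
def pvFillRow (row : Int) (d : PySem.Dict String (Option String)) (chunk : List Char) :
    PySem.Dict String (Option String) :=
  (pvLETTERS.toList.zip chunk).foldl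
    (fun d lc => d.insert (String.ofList [lc.1] ++ PySem.Int.toStr row) (some (String.ofList [lc.2]))) d

-- while rest: chunk, rest = rest[:4], rest[4:]; fill; row += 1  — enumerated as a pattern: a full chunk of 4
-- recurses on what follows; a final short chunk (rest[4:] = "") fills and stops.
def pvRowsB (row : Int) (d : PySem.Dict String (Option String)) :
    List Char → PySem.Dict String (Option String)
  | a :: b :: c :: e :: rest => pvRowsB (row + 1) (pvFillRow row d [a, b, c, e]) rest
  | [] => d
  | s => pvFillRow row d s

def make_init_position_dict_alt (input_string : String) (edges : List (String × List String)) : List (String × Option String) :=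
  let locations : PySem.Dict String (Option String) :=
    edges.foldl (fun d e => d.insert e.1 none) PySem.Dict.empty
  (pvRowsB 1 locations input_string.toList).items

-- ===== PRECONDITION & SPEC =====
def Spec_make_init_position_dict (input_string : String) (edges : List (String × List String)) (out : List (String × Option String)) : Prop := out = make_init_position_dict_alt input_string edges
instance (input_string : String) (edges : List (String × List String)) (out : List (String × Option String)) : Decidable (Spec_make_init_position_dict input_string edges out) := by unfold Spec_make_init_position_dict; infer_instance

-- ===== CLAIM (what is proved, stated in full; the proofs are below) =====
def Claim_equal_make_init_position_dict : Prop := ∀ (input_string : String) (edges : List (String × List String)), Dom_make_init_position_dict input_string edges → Spec_make_init_position_dict input_string edges (make_init_position_dict input_string edges)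

-- ===== LEMMAS AND PROOFS =====

-- A's fold started at column 0 computes B's row recursion, for any starting row.
theorem pv_loop_eq (n : Nat) : ∀ (chars : List Char), chars.length ≤ n →
    ∀ (r : Int) (d : PySem.Dict String (Option String)),
    (chars.foldl pvStepA (d, r, 0)).1 = pvRowsB r d chars := by
  induction n with
  | zero =>
    intro chars h r d
    have : chars = [] := List.eq_nil_of_length_eq_zero (Nat.le_zero.mp h)
    subst this; simp [pvRowsB]
  | succ n ih =>
    intro chars h r d
    match chars with
    | [] => simp [pvRowsB]
    | [a] =>
      simp [pvRowsB, pvFillRow, pvStepA, pvLETTERS, PySem.Str.pyGet?]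
    | [a, b] =>
      simp [pvRowsB, pvFillRow, pvStepA, pvLETTERS, PySem.Str.pyGet?]
    | [a, b, c] =>
      simp [pvRowsB, pvFillRow, pvStepA, pvLETTERS, PySem.Str.pyGet?]
    | a :: b :: c :: e :: rest =>
      have hlen : rest.length ≤ n := by
        simp at h; omega
      simp only [List.foldl_cons]
      rw [show ∀ x y z w (d : PySem.Dict String (Option String)),
        pvStepA (pvStepA (pvStepA (pvStepA (d, r, 0) x) y) z) w
          = (pvFillRow r d [x, y, z, w], r + 1, 0) from ?_, ih rest hlen]
      · simp [pvRowsB]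
      · intro x y z w d
        simp [pvStepA, pvFillRow, pvLETTERS, PySem.Str.pyGet?]

-- ===== VERDICT (by name: the statement is the Claim_ definition above) =====
theorem make_init_position_dict_spec : Claim_equal_make_init_position_dict := by
  intro input_string edges _
  unfold Spec_make_init_position_dict make_init_position_dict make_init_position_dict_alt
  exact congrArg PySem.Dict.items
    (pv_loop_eq input_string.toList.length input_string.toList le_rfl 1 _)
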